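-- pv_equiv track=rewrite | github.com/Decidish/decidish | mlpipeline/pretrian/clean_recipe.py | verify_preference_list
-- ===== SOURCE A (Python) =====
-- from typing import Dict, Set
--
-- def verify_preference_list(our_list: Dict, json_set: Set):
--     mark = []
--     for item in our_list.keys():
--         if item in json_set:
--             mark.append("True")
--         else:
--             mark.append("False")
--     positive = mark.count("True")
--     negative = mark.count("False")
--     return positive, negative
-- ===== SOURCE B (Python) =====
-- def verify_preference_list(our_list, json_set):
--     # Sort the keys and the set, then count common elements with a
--     # two-pointer merge walk; no per-key membership tests at all.
--     a = sorted(our_list.keys())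
--     b = sorted(json_set)
--     i = j = positive = 0
--     while i < len(a) and j < len(b):
--         if a[i] < b[j]:
--             i += 1
--         elif b[j] < a[i]:
--             j += 1
--         else:
--             positive += 1
--             i += 1
--             j += 1
--     return positive, len(a) - positive
-- ===== Notes on version B (the rewrite author's own statement) =====
-- stated objective: alternative
-- what changed: Replaces the mark-list loop with membership tests plus two .count passes by sorting the keys and the set and counting common elements in a single two-pointer merge walk, with the negative count derived by subtraction.
import Mathlib
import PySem

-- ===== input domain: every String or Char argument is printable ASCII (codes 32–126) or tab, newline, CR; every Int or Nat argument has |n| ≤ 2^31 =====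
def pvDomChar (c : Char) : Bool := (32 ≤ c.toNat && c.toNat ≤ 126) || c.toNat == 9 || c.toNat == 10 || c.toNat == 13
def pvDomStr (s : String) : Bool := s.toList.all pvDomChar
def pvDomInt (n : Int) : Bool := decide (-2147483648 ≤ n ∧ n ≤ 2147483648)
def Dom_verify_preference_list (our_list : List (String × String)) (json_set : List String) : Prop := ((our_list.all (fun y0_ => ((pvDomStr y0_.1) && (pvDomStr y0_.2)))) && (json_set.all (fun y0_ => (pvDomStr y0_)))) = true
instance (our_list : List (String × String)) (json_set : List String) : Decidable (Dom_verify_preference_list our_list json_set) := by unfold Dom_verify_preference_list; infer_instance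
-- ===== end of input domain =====

-- B counts the common elements of the sorted key list and the sorted set by a two-pointer merge walk (no membership tests).

-- ===== PORT A =====
-- our_list models a Python dict: .keys() = first occurrences of the key column, in order
def verify_preference_list (our_list : List (String × String)) (json_set : List String) : Int × Int :=
  let mark : List String :=
    (PySem.List.dedup (our_list.map Prod.fst)).foldl
      (fun mark item => mark ++ [if json_set.contains item then "True" else "False"]) []
  ((PySem.List.count mark "True" : Int), (PySem.List.count mark "False" : Int))

-- ===== PORT B =====
-- the two-pointer while loop of Source B, as recursion on the two remaining suffixes
def pvMergeCount : List String → List String → Nat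
  | [], _ => 0
  | _ :: _, [] => 0
  | x :: xs, y :: ys =>
    if x < y then pvMergeCount xs (y :: ys)
    else if y < x then pvMergeCount (x :: xs) ys
    else 1 + pvMergeCount xs ys

def verify_preference_list_alt (our_list : List (String × String)) (json_set : List String) : Int × Int :=
  let a := PySem.List.sorted (PySem.List.dedup (our_list.map Prod.fst)) (fun x => x) false
  let b := PySem.List.sorted json_set (fun x => x) false
  let positive := pvMergeCount a b
  ((positive : Int), (a.length : Int) - (positive : Int))

-- ===== PRECONDITION & SPEC =====
def Spec_verify_preference_list (our_list : List (String × String)) (json_set : List String) (out : Int × Int) : Prop := out = verify_preference_list_alt our_list json_set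
instance (our_list : List (String × String)) (json_set : List String) (out : Int × Int) : Decidable (Spec_verify_preference_list our_list json_set out) := by unfold Spec_verify_preference_list; infer_instance

-- ===== CLAIM =====
def Claim_equal_verify_preference_list : Prop := ∀ (our_list : List (String × String)) (json_set : List String), Dom_verify_preference_list our_list json_set → Spec_verify_preference_list our_list json_set (verify_preference_list our_list json_set)

-- ===== LEMMAS AND PROOFS =====

theorem pv_foldl_mark (js : List String) (keys : List String) (acc : List String) :
    keys.foldl (fun mark item => mark ++ [if item ∈ js then "True" else "False"]) acc
      = acc ++ keys.map (fun item => if item ∈ js then "True" else "False") := by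
  induction keys generalizing acc with
  | nil => simp
  | cons k ks ih =>
    rw [List.foldl_cons, ih]
    simp

theorem pv_count_true (js : List String) (keys : List String) :
    List.count "True" (keys.map (fun item => if item ∈ js then "True" else "False"))
      = (keys.filter (fun x => decide (x ∈ js))).length := by
  induction keys with
  | nil => simp
  | cons k ks ih =>
    by_cases h : k ∈ js <;>
      simp [List.count_cons, List.filter_cons, h, ih]

theorem pv_count_false (js : List String) (keys : List String) :
    List.count "False" (keys.map (fun item => if item ∈ js then "True" else "False"))
      + (keys.filter (fun x => decide (x ∈ js))).length = keys.length := by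
  induction keys with
  | nil => simp
  | cons k ks ih =>
    by_cases h : k ∈ js <;>
      simp [List.count_cons, List.filter_cons, h] <;> omega

-- the merge walk over a strictly increasing `a` and a weakly increasing `b` counts the elements of `a` that lie in `b`
theorem pv_mergeCount_eq (a b : List String) (ha : a.Pairwise (· < ·)) (hb : b.Pairwise (· ≤ ·)) :
    pvMergeCount a b = (a.filter (fun x => decide (x ∈ b))).length := by
  induction a, b using pvMergeCount.induct with
  | case1 b => simp [pvMergeCount]
  | case2 x xs => simp [pvMergeCount]
  | case3 x xs y ys hxy ih =>
    have hxnot : x ∉ y :: ys := by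
      intro hmem
      rcases List.mem_cons.mp hmem with rfl | hmem'
      · exact absurd hxy (lt_irrefl x)
      · have : y ≤ x := (List.pairwise_cons.mp hb).1 _ hmem'
        exact absurd (lt_of_lt_of_le hxy this) (lt_irrefl x)
    rw [pvMergeCount, if_pos hxy, ih ha.tail hb]
    have hx' : ¬(x = y ∨ x ∈ ys) := by simpa [List.mem_cons] using hxnot
    simp [List.filter_cons, hx']
  | case4 x xs y ys hxy hyx ih =>
    have hcong : ∀ z ∈ x :: xs, decide (z ∈ y :: ys) = decide (z ∈ ys) := by
      intro z hz
      have hyz : y < z := by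
        rcases List.mem_cons.mp hz with rfl | hz'
        · exact hyx
        · exact lt_trans hyx ((List.pairwise_cons.mp ha).1 _ hz')
      simp only [List.mem_cons]
      have : z ≠ y := ne_of_gt hyz
      simp [this]
    rw [pvMergeCount, if_neg hxy, if_pos hyx, ih ha hb.tail, List.filter_congr hcong]
  | case5 x xs y ys hxy hyx ih =>
    have hxy' : x = y := le_antisymm (le_of_not_gt hyx) (le_of_not_gt hxy)
    have hcong : ∀ z ∈ xs, decide (z ∈ y :: ys) = decide (z ∈ ys) := by
      intro z hz
      have : y < z := hxy' ▸ (List.pairwise_cons.mp ha).1 _ hz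
      simp only [List.mem_cons]
      have : z ≠ y := ne_of_gt this
      simp [this]
    rw [pvMergeCount, if_neg hxy, if_neg hyx, ih ha.tail hb.tail]
    have h2 : ∀ z ∈ xs, (decide (z = y ∨ z ∈ ys)) = decide (z ∈ ys) := by
      intro z hz
      simpa [List.mem_cons] using hcong z hz
    simp only [List.filter_cons, List.mem_cons]
    rw [if_pos (by simp [hxy'] : decide (x = y ∨ x ∈ ys) = true), List.filter_congr h2]
    simp [Nat.add_comm]

-- ===== VERDICT =====
theorem verify_preference_list_spec : Claim_equal_verify_preference_list := by
  intro our_list json_set _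
  unfold Spec_verify_preference_list verify_preference_list verify_preference_list_alt
  set keys := PySem.List.dedup (our_list.map Prod.fst) with hkeys
  set a := PySem.List.sorted keys (fun x => x) false with hadef
  set b := PySem.List.sorted json_set (fun x => x) false with hbdef
  have hperm_a : a.Perm keys := PySem.List.sorted_perm ..
  have ha_nodup : a.Nodup := hperm_a.nodup_iff.mpr (by rw [hkeys, PySem.List.dedup_eq_ofList]; exact PySem.Set.nodup_ofList _)
  have ha_le : a.Pairwise (· ≤ ·) := by
    have := PySem.List.sorted_pairwise (xs := keys) (key := fun x => x)
    simpa [hadef] using this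
  have ha_lt : a.Pairwise (· < ·) :=
    (ha_le.and ha_nodup).imp (fun h => lt_of_le_of_ne h.1 h.2)
  have hb_le : b.Pairwise (· ≤ ·) := by
    have := PySem.List.sorted_pairwise (xs := json_set) (key := fun x => x)
    simpa [hbdef] using this
  have hmc := pv_mergeCount_eq a b ha_lt hb_le
  have hmemb : ∀ z ∈ a, decide (z ∈ b) = decide (z ∈ json_set) := by
    intro z _
    simp [hbdef, PySem.List.mem_sorted]
  rw [List.filter_congr hmemb] at hmc
  have hfilt : (a.filter (fun x => decide (x ∈ json_set))).length
      = (keys.filter (fun x => decide (x ∈ json_set))).length :=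
    (hperm_a.filter _).length_eq
  have hlen : a.length = keys.length := hperm_a.length_eq
  have ht := pv_count_true json_set keys
  have hf := pv_count_false json_set keys
  simp only [List.contains_eq_mem, decide_eq_true_eq, pv_foldl_mark, List.nil_append,
    PySem.List.count, Prod.mk.injEq]
  constructor
  · rw [hmc, hfilt]; exact_mod_cast ht
  · rw [hmc, hfilt, hlen]
    have : keys.length ≥ (keys.filter (fun x => decide (x ∈ json_set))).length := List.length_filter_le _ _
    omega
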